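-- pv_equiv track=rewrite | github.com/zzkyyds/pypro | pyProject/testPy/t2.py | allPermutationsReverseOrNot
-- ===== SOURCE A (Python) =====
-- from itertools import permutations, product
--
-- def allPermutationsReverseOrNot(arr: list[list])->list[list[list]]:
--     '''
--     获取数组的所有排列,并且有反转或者不反转
--     总计2^n*n!
--     '''
--     if len(arr) == 0:
--         return []
--     if len(arr) == 1:
--         return arr+[arr[0][::-1]]
--     # 太大了,不考虑
--     if len(arr) >= 6:
--         return []
--     res = []
--     n = len(arr)
--     per = list(permutations(arr))
--     binary = list(product([False, True], repeat=n))
--     for p in per: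
--         for bList in binary:
--             res.append([x if b else x[::-1] for x,b in zip(p,bList)])
--     return res
-- ===== SOURCE B (Python) =====
-- def _perms(rest):
--     # all permutations of rest, picking the leading element by ascending index
--     if not rest:
--         return [[]]
--     return [[rest[i]] + tail
--             for i in range(len(rest))
--             for tail in _perms(rest[:i] + rest[i + 1:])]
--
--
-- def _rows(p):
--     # each element reversed-or-not; leftmost position most significant, reversed first
--     if not p:
--         return [[]]
--     tails = _rows(p[1:])
--     return [[v] + t for v in (p[0][::-1], p[0]) for t in tails]
--
--
-- def allPermutationsReverseOrNot(arr: list[list]) -> list[list[list]]: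
--     if len(arr) == 0 or len(arr) >= 6:
--         return []
--     return [row for p in _perms(arr) for row in _rows(p)]
-- ===== Notes on version B (the rewrite author's own statement) =====
-- stated objective: simpler
-- what changed: Replaces itertools.permutations and product([False,True],repeat=n) plus the nested append loops with two small recursive generators (index-picking permutations; reversed-then-plain orientation rows) fused by a single comprehension; Pre_ excludes singleton inputs where A returns a value outside the declared return type.
-- outside the precondition, e.g. on allPermutationsReverseOrNot([[1, 2]]): A returns [[1, 2], [2, 1]], B returns [[[2, 1]], [[1, 2]]]
import Mathlib
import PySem

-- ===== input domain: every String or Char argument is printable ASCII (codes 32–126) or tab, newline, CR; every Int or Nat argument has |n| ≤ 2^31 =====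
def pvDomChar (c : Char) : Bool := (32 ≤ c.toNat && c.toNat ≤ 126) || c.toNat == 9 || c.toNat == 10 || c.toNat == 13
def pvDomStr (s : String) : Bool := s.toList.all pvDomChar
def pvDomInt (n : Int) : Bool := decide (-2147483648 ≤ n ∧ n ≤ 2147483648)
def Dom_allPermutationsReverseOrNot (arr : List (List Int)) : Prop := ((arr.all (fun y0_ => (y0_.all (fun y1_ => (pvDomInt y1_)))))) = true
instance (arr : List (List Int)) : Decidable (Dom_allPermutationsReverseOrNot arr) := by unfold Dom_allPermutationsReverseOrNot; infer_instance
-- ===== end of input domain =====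

-- B replaces itertools.permutations/product with two small recursive generators fused by a
-- comprehension (objective: simpler); the singleton case, where A returns a differently-typed
-- value, is excluded by Pre_.

-- ===== PORT A =====
-- itertools-style helpers for port A: `picks l` pairs each element with the remaining list,
-- `permsA` enumerates permutations in itertools order, `boolVecs n` is product([False,True],repeat=n).
def picks (l : List (List Int)) : List (List Int × List (List Int)) :=
  match l with
  | [] => []
  | x :: xs => (x, xs) :: (picks xs).map (fun p => (p.1, x :: p.2))

def permsA : Nat → List (List Int) → List (List (List Int))
  | _, [] => [[]]
  | 0, _ :: _ => []
  | f + 1, x :: xs =>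
      (picks (x :: xs)).flatMap (fun p => (permsA f p.2).map (fun t => p.1 :: t))

def boolVecs : Nat → List (List Bool)
  | 0 => [[]]
  | n + 1 => [false, true].flatMap (fun b => (boolVecs n).map (fun v => b :: v))

def allPermutationsReverseOrNot (arr : List (List Int)) : List (List (List Int)) :=
  if arr.length = 0 then []
  else if arr.length = 1 then
    -- Python here returns arr+[arr[0][::-1]], a list[list[int]] — not a value of the declared
    -- list[list[list]] type, hence unrepresentable; this branch lies outside Pre_.
    [[arr.headD []], [(arr.headD []).reverse]]
  else if 6 ≤ arr.length then []
  else
    let per := permsA arr.length arr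
    let binary := boolVecs arr.length
    per.foldl (fun res p =>
      binary.foldl (fun res bList =>
        res ++ [(p.zip bList).map (fun xb => if xb.2 then xb.1 else xb.1.reverse)]) res) []

-- ===== PORT B =====
-- `permsB` picks the leading element by ascending index from the remaining list;
-- `rowsB` prepends each element reversed-then-plain to the rows of the tail.
def permsB : Nat → List (List Int) → List (List (List Int))
  | _, [] => [[]]
  | 0, _ :: _ => []
  | f + 1, x :: xs =>
      (List.range (x :: xs).length).flatMap (fun i =>
        (permsB f ((x :: xs).take i ++ (x :: xs).drop (i + 1))).map
          (fun t => (x :: xs).getD i [] :: t))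

def rowsB : List (List Int) → List (List (List Int))
  | [] => [[]]
  | x :: xs =>
      let tails := rowsB xs
      [x.reverse, x].flatMap (fun v => tails.map (fun t => v :: t))

def allPermutationsReverseOrNot_alt (arr : List (List Int)) : List (List (List Int)) :=
  if arr.length = 0 ∨ 6 ≤ arr.length then []
  else (permsB arr.length arr).flatMap rowsB

-- ===== PRECONDITION & SPEC =====
-- Pre_ excludes singleton lists: there A returns arr+[arr[0][::-1]], a list of int-lists rather
-- than a value of the declared list-of-list-of-lists return type; B returns the wrapped rows.
def Pre_allPermutationsReverseOrNot (arr : List (List Int)) : Prop := arr.length ≠ 1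
instance (arr : List (List Int)) : Decidable (Pre_allPermutationsReverseOrNot arr) := by
  unfold Pre_allPermutationsReverseOrNot; infer_instance

def pvWitness_allPermutationsReverseOrNot : List (List Int) := [[1, 2], [3]]

def Spec_allPermutationsReverseOrNot (arr : List (List Int)) (out : List (List (List Int))) : Prop := out = allPermutationsReverseOrNot_alt arr
instance (arr : List (List Int)) (out : List (List (List Int))) : Decidable (Spec_allPermutationsReverseOrNot arr out) := by unfold Spec_allPermutationsReverseOrNot; infer_instance

-- ===== CLAIM (what is proved, stated in full; the proofs are below) =====
def Claim_equal_allPermutationsReverseOrNot : Prop := ∀ (arr : List (List Int)), Dom_allPermutationsReverseOrNot arr → Pre_allPermutationsReverseOrNot arr → Spec_allPermutationsReverseOrNot arr (allPermutationsReverseOrNot arr)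

-- ===== LEMMAS AND PROOFS =====

-- picks is the index-based enumeration permsB uses
theorem picks_eq (l : List (List Int)) :
    picks l = (List.range l.length).map
      (fun i => (l.getD i [], l.take i ++ l.drop (i + 1))) := by
  induction l with
  | nil => simp [picks]
  | cons x xs ih =>
      simp only [picks, ih, List.length_cons, List.range_succ_eq_map, List.map_cons,
        List.map_map]
      refine congrArg₂ List.cons (by simp) ?_
      apply List.map_congr_left
      intro i hi
      simp [Function.comp]

theorem permsA_eq_permsB (f : Nat) : ∀ l, permsA f l = permsB f l := by
  induction f with
  | zero =>
      intro l; cases l <;> rfl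
  | succ f ih =>
      intro l
      cases l with
      | nil => rfl
      | cons x xs =>
          show (picks (x :: xs)).flatMap _ = (List.range (x :: xs).length).flatMap _
          rw [picks_eq, List.flatMap_map]
          apply List.flatMap_congr
          intro i _
          rw [ih]

-- every permutation keeps the length
theorem permsB_length (f : Nat) :
    ∀ l : List (List Int), l.length ≤ f → ∀ p ∈ permsB f l, p.length = l.length := by
  induction f with
  | zero =>
      intro l hl p hp
      cases l with
      | nil => simp [permsB] at hp; simp [hp]
      | cons x xs => simp at hl
  | succ f ih =>
      intro l hl p hp
      cases l with
      | nil => simp [permsB] at hp; simp [hp]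
      | cons x xs =>
          simp only [List.length_cons] at hl
          simp only [permsB, List.mem_flatMap, List.mem_map, List.mem_range] at hp
          obtain ⟨i, hi, t, ht, rfl⟩ := hp
          simp only [List.length_cons] at hi
          have hlen : ((x :: xs).take i ++ (x :: xs).drop (i + 1)).length = xs.length := by
            simp only [List.length_append, List.length_take, List.length_drop,
              List.length_cons]
            omega
          have := ih ((x :: xs).take i ++ (x :: xs).drop (i + 1))
            (by simp only [hlen]; omega) t ht
          simp only [List.length_cons, this, hlen]

-- the inner loop over product([False,True],repeat=n) equals rowsB
theorem map_boolVecs_eq_rowsB (p : List (List Int)) :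
    (boolVecs p.length).map
      (fun bList => (p.zip bList).map (fun xb => if xb.2 then xb.1 else xb.1.reverse))
      = rowsB p := by
  induction p with
  | nil => rfl
  | cons x xs ih =>
      simp only [List.length_cons, boolVecs, rowsB, List.map_flatMap, List.map_map]
      simp only [List.flatMap_cons, List.flatMap_nil, List.append_nil]
      rw [← ih]
      refine congrArg₂ (· ++ ·) ?_ ?_ <;>
        · rw [List.map_map]
          apply List.map_congr_left
          intro v _
          simp [List.zip]

-- one pass of the inner appending foldl
theorem foldl_append_singleton (binary : List (List Bool)) (p : List (List Int))
    (init : List (List (List Int))) :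
    binary.foldl (fun res bList =>
      res ++ [(p.zip bList).map (fun xb => if xb.2 then xb.1 else xb.1.reverse)]) init
    = init ++ binary.map (fun bList =>
        (p.zip bList).map (fun xb => if xb.2 then xb.1 else xb.1.reverse)) := by
  induction binary generalizing init with
  | nil => simp
  | cons b bs ih => simp [ih]

-- the nested appending foldl is a flatMap
theorem foldl_foldl_eq_flatMap (per : List (List (List Int))) (binary : List (List Bool))
    (init : List (List (List Int))) :
    per.foldl (fun res p =>
      binary.foldl (fun res bList =>
        res ++ [(p.zip bList).map (fun xb => if xb.2 then xb.1 else xb.1.reverse)]) res) init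
    = init ++ per.flatMap (fun p =>
        binary.map (fun bList =>
          (p.zip bList).map (fun xb => if xb.2 then xb.1 else xb.1.reverse))) := by
  induction per generalizing init with
  | nil => simp
  | cons p ps ih =>
      rw [List.foldl_cons, foldl_append_singleton, ih, List.flatMap_cons, List.append_assoc]

-- ===== VERDICT (by name: the statement is the Claim_ definition above) =====
theorem allPermutationsReverseOrNot_spec : Claim_equal_allPermutationsReverseOrNot := by
  intro arr _ hpre
  unfold Spec_allPermutationsReverseOrNot allPermutationsReverseOrNot allPermutationsReverseOrNot_alt
  by_cases h0 : arr.length = 0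
  · simp [h0]
  · by_cases h6 : 6 ≤ arr.length
    · rw [if_neg h0, if_neg hpre, if_pos h6, if_pos (Or.inr h6)]
    · rw [if_neg h0, if_neg hpre, if_neg h6,
        if_neg (by omega : ¬(arr.length = 0 ∨ 6 ≤ arr.length))]
      rw [permsA_eq_permsB, foldl_foldl_eq_flatMap, List.nil_append]
      apply List.flatMap_congr
      intro p hp
      have hlen := permsB_length arr.length arr (le_refl _) p hp
      rw [← hlen]
      exact map_boolVecs_eq_rowsB p
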